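-- pv_equiv track=rewrite | github.com/dongwinterdong/length-max-tokenizer | eval_downstream_threeway.py | _pack_contiguous
-- ===== SOURCE A (Python) =====
-- def _pack_contiguous(lines: list[str], start: int, target_chars: int) -> str:
--     if target_chars <= 0:
--         return lines[start % len(lines)]
--     parts: list[str] = []
--     n = 0
--     i = start % len(lines)
--     while n < target_chars and len(parts) < 100_000:
--         s = lines[i]
--         parts.append(s)
--         n += len(s) + 1
--         i += 1
--         if i >= len(lines):
--             i = 0
--     return "\n".join(parts)
-- ===== SOURCE B (Python) =====
-- def _pack_contiguous(lines: list[str], start: int, target_chars: int) -> str: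
--     m = len(lines)
--     if target_chars <= 0:
--         return lines[start % m]
--     i0 = start % m
--     # prefix[r] = total cost (len+1 per line) of the first r lines of the cycle starting at i0
--     prefix = [0]
--     running = 0
--     for j in range(m):
--         running += len(lines[(i0 + j) % m]) + 1
--         prefix.append(running)
--     total = running  # cost of one full cycle, >= m >= 1
--     full = (target_chars - 1) // total          # whole cycles strictly below the threshold
--     rem = target_chars - full * total           # 1 <= rem <= total
--     r = 1
--     while prefix[r] < rem:                      # smallest r in 1..m with prefix[r] >= rem
--         r += 1
--     k = full * m + r                            # minimal number of lines reaching target_chars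
--     if k > 100_000:
--         k = 100_000
--     return "\n".join(lines[(i0 + j) % m] for j in range(k))
-- ===== Notes on version B (the rewrite author's own statement) =====
-- stated objective: alternative
-- what changed: Replaces A's one-line-per-iteration accumulation loop by prefix sums over a single cycle of the lines plus floor-division/remainder-scan arithmetic that computes the minimal line count k directly, then builds the output by modular indexing.
import Mathlib
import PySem

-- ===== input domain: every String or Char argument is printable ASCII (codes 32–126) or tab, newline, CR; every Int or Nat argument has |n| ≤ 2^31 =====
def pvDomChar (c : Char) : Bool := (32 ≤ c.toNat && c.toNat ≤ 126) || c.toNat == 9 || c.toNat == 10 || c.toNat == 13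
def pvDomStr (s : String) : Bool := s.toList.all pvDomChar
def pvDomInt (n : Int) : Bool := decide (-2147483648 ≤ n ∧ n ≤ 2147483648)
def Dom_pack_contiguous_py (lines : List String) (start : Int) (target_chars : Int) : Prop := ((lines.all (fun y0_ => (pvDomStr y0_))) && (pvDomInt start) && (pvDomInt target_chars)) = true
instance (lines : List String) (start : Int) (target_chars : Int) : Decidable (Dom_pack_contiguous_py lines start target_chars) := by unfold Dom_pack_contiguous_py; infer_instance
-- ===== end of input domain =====

-- B replaces A's line-by-line accumulation loop by prefix sums over ONE cycle of the
-- lines plus floor-division arithmetic that finds the minimal line count reaching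
-- target_chars directly (objective: alternative algorithm, similar cost).

-- ===== PORT A =====
def packLoopA (lines : List String) (target : Int) (parts : List String) (n : Int) (i : Int) : List String :=
  if h : n < target ∧ parts.length < 100000 then
    let s := PySem.List.pyGetD lines i ""
    packLoopA lines target (parts ++ [s]) (n + PySem.Str.len s + 1)
      (if i + 1 ≥ PySem.List.len lines then 0 else i + 1)
  else parts
termination_by 100000 - parts.length
decreasing_by simp; omega

def pack_contiguous_py (lines : List String) (start : Int) (target_chars : Int) : String :=
  if target_chars ≤ 0 then
    PySem.List.pyGetD lines (PySem.Int.mod start (PySem.List.len lines)) ""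
  else
    PySem.Str.join "\n" (packLoopA lines target_chars [] 0 (PySem.Int.mod start (PySem.List.len lines)))

-- ===== PORT B =====
def findR (pre : List Int) (rem : Int) (r : Nat) : Nat :=
  if h : r < pre.length ∧ PySem.List.pyGetD pre (r : Int) 0 < rem then
    findR pre rem (r + 1)
  else r
termination_by pre.length - r

def pack_contiguous_py_alt (lines : List String) (start : Int) (target_chars : Int) : String :=
  let m := PySem.List.len lines
  if target_chars ≤ 0 then
    PySem.List.pyGetD lines (PySem.Int.mod start m) ""
  else
    let i0 := PySem.Int.mod start m
    let st := (PySem.List.pyRange 0 m 1).foldl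
      (fun (st : Int × List Int) j =>
        let running := st.1 + PySem.Str.len (PySem.List.pyGetD lines (PySem.Int.mod (i0 + j) m) "") + 1
        (running, st.2 ++ [running]))
      ((0 : Int), [(0 : Int)])
    let total := st.1
    let full := PySem.Int.floordiv (target_chars - 1) total
    let rem := target_chars - full * total
    let r := findR st.2 rem 1
    let k := full * m + (r : Int)
    let k' := if k > 100000 then (100000 : Int) else k
    PySem.Str.join "\n" ((PySem.List.pyRange 0 k' 1).map
      (fun j => PySem.List.pyGetD lines (PySem.Int.mod (i0 + j) m) ""))

-- ===== PRECONDITION & SPEC =====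
-- Pre_ excludes only the empty list, on which Python A raises ZeroDivisionError (start % 0).
def Pre_pack_contiguous_py (lines : List String) (start : Int) (target_chars : Int) : Prop :=
  lines ≠ []
instance (lines : List String) (start : Int) (target_chars : Int) : Decidable (Pre_pack_contiguous_py lines start target_chars) := by unfold Pre_pack_contiguous_py; infer_instance
def pvWitness_pack_contiguous_py : List String × Int × Int := (["ab", "c"], 3, 5)

def Spec_pack_contiguous_py (lines : List String) (start : Int) (target_chars : Int) (out : String) : Prop := out = pack_contiguous_py_alt lines start target_chars
instance (lines : List String) (start : Int) (target_chars : Int) (out : String) : Decidable (Spec_pack_contiguous_py lines start target_chars out) := by unfold Spec_pack_contiguous_py; infer_instance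

-- ===== CLAIM (what is proved, stated in full; the proofs are below) =====
def Claim_equal_pack_contiguous_py : Prop := ∀ (lines : List String) (start : Int) (target_chars : Int), Dom_pack_contiguous_py lines start target_chars → Pre_pack_contiguous_py lines start target_chars → Spec_pack_contiguous_py lines start target_chars (pack_contiguous_py lines start target_chars)

-- ===== LEMMAS AND PROOFS =====

-- the j-th line of the cycle starting at index i0, and the cumulative cost of the first t of them
def pvPiece (lines : List String) (i0 j : Nat) : String := lines.getD ((i0 + j) % lines.length) ""
def pvS (lines : List String) (i0 : Nat) : Nat → Int
  | 0 => 0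
  | t + 1 => pvS lines i0 t + PySem.Str.len (pvPiece lines i0 t) + 1

theorem pvS_step (lines : List String) (i0 t : Nat) :
    pvS lines i0 (t + 1) = pvS lines i0 t + PySem.Str.len (pvPiece lines i0 t) + 1 := rfl

theorem str_len_nonneg (s : String) : 0 ≤ PySem.Str.len s := by
  simp [PySem.Str.len_eq]

theorem pvS_ge (lines : List String) (i0 : Nat) : ∀ t : Nat, (t : Int) ≤ pvS lines i0 t := by
  intro t
  induction t with
  | zero => simp [pvS]
  | succ t ih =>
      have := str_len_nonneg (pvPiece lines i0 t)
      rw [pvS_step]; push_cast; omega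

theorem pvS_mono (lines : List String) (i0 : Nat) {a b : Nat} (h : a ≤ b) :
    pvS lines i0 a ≤ pvS lines i0 b := by
  induction b with
  | zero => simp [Nat.le_zero.mp h]
  | succ b ih =>
      rcases Nat.lt_or_ge a (b + 1) with hlt | hge
      · have h1 := ih (Nat.lt_succ_iff.mp hlt)
        have h2 := str_len_nonneg (pvPiece lines i0 b)
        rw [pvS_step]; omega
      · have : a = b + 1 := le_antisymm h hge
        simp [this]

theorem pvS_exists (lines : List String) (i0 : Nat) (target : Int) :
    ∃ k, target ≤ pvS lines i0 k := by
  refine ⟨target.toNat, ?_⟩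
  calc target ≤ (target.toNat : Int) := Int.self_le_toNat target
    _ ≤ _ := pvS_ge lines i0 target.toNat

-- minimal number of lines whose cumulative cost reaches the threshold
def pvK (lines : List String) (i0 : Nat) (target : Int) : Nat :=
  Nat.find (pvS_exists lines i0 target)

theorem pvK_le_iff (lines : List String) (i0 : Nat) (target : Int) (t : Nat) :
    pvK lines i0 target ≤ t ↔ target ≤ pvS lines i0 t := by
  constructor
  · intro h
    exact le_trans (Nat.find_spec (pvS_exists lines i0 target)) (pvS_mono lines i0 h)
  · intro h
    exact Nat.find_min' _ h

-- the index update of A's loop is cyclic increment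
theorem index_step (lines : List String) (x : Nat) (hm : 0 < lines.length) :
    (if ((x % lines.length : Nat) : Int) + 1 ≥ PySem.List.len lines then (0 : Int)
      else ((x % lines.length : Nat) : Int) + 1)
      = (((x + 1) % lines.length : Nat) : Int) := by
  rw [PySem.List.len_eq]
  have key : (x + 1) % lines.length = (x % lines.length + 1) % lines.length :=
    (Nat.mod_add_mod x lines.length 1).symm
  have hx : x % lines.length < lines.length := Nat.mod_lt _ hm
  split_ifs with h
  · have he : x % lines.length + 1 = lines.length := by omega
    rw [key, he, Nat.mod_self]; simp
  · have hlt : x % lines.length + 1 < lines.length := by omega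
    rw [key, Nat.mod_eq_of_lt hlt]; push_cast; ring

theorem pyGetD_cyc (lines : List String) (i0 j : Nat) :
    PySem.List.pyGetD lines ((((i0 + j) % lines.length : Nat) : Int)) "" = pvPiece lines i0 j := by
  rw [PySem.List.pyGetD_natCast]; rfl

-- A's loop produces exactly the next (min K 100000 - t) pieces
theorem loopA_spec (lines : List String) (i0 : Nat) (target : Int) (hm : 0 < lines.length) :
    ∀ (b t : Nat) (parts : List String), t + b = 100000 → parts.length = t →
    packLoopA lines target parts (pvS lines i0 t) (((i0 + t) % lines.length : Nat) : Int)
      = parts ++ (List.range (min (pvK lines i0 target) 100000 - t)).map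
          (fun j => pvPiece lines i0 (t + j)) := by
  intro b
  induction b with
  | zero =>
      intro t parts htb hlen
      have ht : t = 100000 := by omega
      rw [packLoopA, dif_neg (by omega)]
      have : min (pvK lines i0 target) 100000 - t = 0 := by omega
      simp [this]
  | succ b ih =>
      intro t parts htb hlen
      by_cases hc : pvS lines i0 t < target
      · have htK : t < pvK lines i0 target := by
          by_contra h
          exact absurd ((pvK_le_iff lines i0 target t).mp (by omega)) (by omega)
        rw [packLoopA, dif_pos ⟨hc, by omega⟩]
        simp only [pyGetD_cyc]
        rw [index_step lines (i0 + t) hm, ← pvS_step]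
        have := ih (t + 1) (parts ++ [pvPiece lines i0 t]) (by omega) (by simp; omega)
        rw [← Nat.add_assoc] at this
        rw [this]
        have hMt : min (pvK lines i0 target) 100000 - t
            = (min (pvK lines i0 target) 100000 - (t + 1)) + 1 := by omega
        rw [hMt, List.range_succ_eq_map]
        simp [List.map_map, Function.comp_def, Nat.add_comm, Nat.add_left_comm]
      · have hK : pvK lines i0 target ≤ t := (pvK_le_iff lines i0 target t).mpr (by omega)
        rw [packLoopA, dif_neg (by simp; omega)]
        have : min (pvK lines i0 target) 100000 - t = 0 := by omega
        simp [this]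

-- periodicity of the pieces and of the prefix sums
theorem pvPiece_add_m (lines : List String) (i0 j : Nat) :
    pvPiece lines i0 (j + lines.length) = pvPiece lines i0 j := by
  simp [pvPiece, ← Nat.add_assoc, Nat.add_mod_right]

theorem pvS_add_m (lines : List String) (i0 : Nat) :
    ∀ t : Nat, pvS lines i0 (t + lines.length) = pvS lines i0 t + pvS lines i0 lines.length := by
  intro t
  induction t with
  | zero => simp [pvS]
  | succ t ih =>
      rw [show t + 1 + lines.length = (t + lines.length) + 1 by ring, pvS_step, ih,
        pvPiece_add_m, pvS_step]
      ring

theorem pvS_cycle (lines : List String) (i0 : Nat) (q r : Nat) :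
    pvS lines i0 (q * lines.length + r) = q * pvS lines i0 lines.length + pvS lines i0 r := by
  induction q with
  | zero => simp
  | succ q ih =>
      rw [show (q + 1) * lines.length + r = (q * lines.length + r) + lines.length by ring,
        pvS_add_m, ih]
      push_cast; ring

-- the prefix-sum fold of B computes (S c, [S 0, …, S c])
theorem fold_prefix (lines : List String) (i0 : Nat) (hm : 0 < lines.length)
    (f : Int × List Int → Nat → Int × List Int)
    (hf : ∀ st c, f st c = (st.1 + PySem.Str.len (pvPiece lines i0 c) + 1,
        st.2 ++ [st.1 + PySem.Str.len (pvPiece lines i0 c) + 1])) :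
    ∀ c : Nat,
    (List.range c).foldl f ((0 : Int), [(0 : Int)])
      = (pvS lines i0 c, (List.range (c + 1)).map (pvS lines i0)) := by
  intro c
  induction c with
  | zero => simp [pvS]
  | succ c ih =>
      rw [List.range_succ, List.foldl_append, ih]
      simp only [List.foldl_cons, List.foldl_nil, hf]
      rw [← pvS_step]
      congr 1
      rw [List.range_succ (n := c + 1), List.map_append]
      simp

-- findR finds the least index whose prefix sum reaches rem
theorem findR_spec (pre : List Int) (rem : Int) (R : Nat) (hR : R < pre.length)
    (hstop : ¬ pre.getD R 0 < rem) (hbelow : ∀ j, j < R → pre.getD j 0 < rem) :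
    ∀ d r, r ≤ R → R - r = d → findR pre rem r = R := by
  intro d
  induction d with
  | zero =>
      intro r hr hd
      have : r = R := by omega
      subst this
      rw [findR, dif_neg (fun hcon => hstop (by
        have := hcon.2
        rwa [PySem.List.pyGetD_natCast] at this))]
  | succ d ih =>
      intro r hr hd
      have hrR : r < R := by omega
      rw [findR, dif_pos ⟨by omega, by rw [PySem.List.pyGetD_natCast]; exact hbelow r hrR⟩]
      exact ih (r + 1) (by omega) (by omega)

theorem getD_map_range_S (lines : List String) (i0 : Nat) (c j : Nat) (hj : j < c) :
    ((List.range c).map (pvS lines i0)).getD j 0 = pvS lines i0 j := by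
  rw [List.getD_eq_getElem?_getD]
  simp [hj]

theorem pyGetD_mod (lines : List String) (i0 : Nat) (hm : 0 < lines.length) (c : Nat) :
    PySem.List.pyGetD lines (PySem.Int.mod ((i0 : Int) + (c : Int)) ((lines.length : Int))) ""
      = pvPiece lines i0 c := by
  have h1 : PySem.Int.mod ((i0 : Int) + (c : Int)) ((lines.length : Int))
      = (((i0 + c) % lines.length : Nat) : Int) := by
    rw [PySem.Int.mod_eq_emod_of_pos (by exact_mod_cast hm)]
    push_cast
    rfl
  rw [h1, pyGetD_cyc]

theorem pack_contiguous_eq (lines : List String) (start target : Int)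
    (hne : lines ≠ []) :
    pack_contiguous_py lines start target = pack_contiguous_py_alt lines start target := by
  have hm : 0 < lines.length := List.length_pos_of_ne_nil hne
  have hmI : (0 : Int) < (lines.length : Int) := by exact_mod_cast hm
  by_cases ht : target ≤ 0
  · simp only [pack_contiguous_py, pack_contiguous_py_alt, if_pos ht]
  · -- shared abbreviations
    have hlen : PySem.List.len lines = (lines.length : Int) := PySem.List.len_eq lines
    set i0n : Nat := (PySem.Int.mod start ((lines.length : Int))).toNat with hi0n
    have hmodnn : 0 ≤ PySem.Int.mod start ((lines.length : Int)) := by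
      rw [PySem.Int.mod_eq_emod_of_pos hmI]
      exact Int.emod_nonneg start (by omega)
    have hmod : PySem.Int.mod start ((lines.length : Int)) = (i0n : Int) :=
      (Int.toNat_of_nonneg hmodnn).symm
    have hi0 : i0n < lines.length := by
      have := Int.emod_lt_of_pos start hmI
      rw [PySem.Int.mod_eq_emod_of_pos hmI] at hi0n
      omega
    simp only [pack_contiguous_py, pack_contiguous_py_alt, if_neg ht, hlen, hmod]
    -- A side
    have hA : packLoopA lines target [] 0 ((i0n : Int))
        = (List.range (min (pvK lines i0n target) 100000)).map (pvPiece lines i0n) := by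
      have h0 : ((i0n : Int)) = (((i0n + 0) % lines.length : Nat) : Int) := by
        rw [Nat.add_zero, Nat.mod_eq_of_lt hi0]
      rw [h0]
      have := loopA_spec lines i0n target hm 100000 0 [] rfl rfl
      rw [show pvS lines i0n 0 = 0 from rfl] at this
      rw [this]
      simp
    rw [hA]
    -- B side: the prefix-sum fold
    have hfold : ((PySem.List.pyRange 0 ((lines.length : Int)) 1).foldl
        (fun (st : Int × List Int) j =>
          let running := st.1 + PySem.Str.len (PySem.List.pyGetD lines
            (PySem.Int.mod ((i0n : Int) + j) ((lines.length : Int))) "") + 1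
          (running, st.2 ++ [running]))
        ((0 : Int), [(0 : Int)]))
        = (pvS lines i0n lines.length,
           (List.range (lines.length + 1)).map (pvS lines i0n)) := by
      rw [PySem.List.pyRange_zero_natCast, List.foldl_map]
      exact fold_prefix lines i0n hm _
        (fun st c => by simp only [pyGetD_mod lines i0n hm c]) lines.length
    rw [hfold]
    set total := pvS lines i0n lines.length with htotal_def
    have htotal : 0 < total := lt_of_lt_of_le hmI (pvS_ge lines i0n lines.length)
    set full := PySem.Int.floordiv (target - 1) total with hfull_def
    have hfull : full = (target - 1) / total := PySem.Int.floordiv_eq_ediv_of_pos htotal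
    have hdm2 : full * total + (target - 1) % total = target - 1 := by
      rw [hfull, Int.mul_comm]
      exact Int.ediv_add_emod _ _
    have hemod_nn : 0 ≤ (target - 1) % total := Int.emod_nonneg _ (by omega)
    have hemod_lt : (target - 1) % total < total := Int.emod_lt_of_pos _ htotal
    set rem := target - full * total with hrem_def
    have hrem1 : 1 ≤ rem := by rw [hrem_def]; omega
    have hrem2 : rem ≤ total := by rw [hrem_def]; omega
    have hfull_nn : 0 ≤ full := by
      rw [hfull]
      exact Int.ediv_nonneg (by omega) (le_of_lt htotal)
    set R := pvK lines i0n rem with hR_def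
    have hRm : R ≤ lines.length := (pvK_le_iff lines i0n rem lines.length).mpr hrem2
    have hR1 : 1 ≤ R := by
      by_contra h
      have : rem ≤ pvS lines i0n 0 := (pvK_le_iff lines i0n rem 0).mp (by omega)
      simp [pvS] at this
      omega
    have hSR : rem ≤ pvS lines i0n R := Nat.find_spec (pvS_exists lines i0n rem)
    have hfindR : findR ((List.range (lines.length + 1)).map (pvS lines i0n)) rem 1 = R := by
      refine findR_spec _ rem R (by simp; omega) ?_ ?_ (R - 1) 1 hR1 rfl
      · rw [getD_map_range_S lines i0n (lines.length + 1) R (by omega)]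
        omega
      · intro j hj
        rw [getD_map_range_S lines i0n (lines.length + 1) j (by omega)]
        have := Nat.find_min (pvS_exists lines i0n rem) (show j < R from hj)
        omega
    rw [hfindR]
    -- the minimal count K equals full cycles plus the remainder index
    have hcycle : ∀ q r : Nat, pvS lines i0n (q * lines.length + r)
        = q * total + pvS lines i0n r := pvS_cycle lines i0n
    have hKeq : pvK lines i0n target = full.toNat * lines.length + R := by
      have hfc : (full.toNat : Int) = full := Int.toNat_of_nonneg hfull_nn
      apply le_antisymm
      · apply (pvK_le_iff lines i0n target _).mpr
        rw [hcycle full.toNat R, hfc]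
        omega
      · by_contra h
        have hle : pvK lines i0n target ≤ full.toNat * lines.length + (R - 1) := by omega
        have := (pvK_le_iff lines i0n target _).mp hle
        rw [hcycle full.toNat (R - 1), hfc] at this
        have hlt : pvS lines i0n (R - 1) < rem := by
          have := Nat.find_min (pvS_exists lines i0n rem) (show R - 1 < R by omega)
          omega
        omega
    -- the capped count
    have hfc : (full.toNat : Int) = full := Int.toNat_of_nonneg hfull_nn
    have hKcast : ((pvK lines i0n target : Nat) : Int) = full * (lines.length : Int) + (R : Int) := by
      rw [hKeq]; push_cast [hfc]; ring
    have hk' : (if full * (lines.length : Int) + (R : Int) > 100000 then (100000 : Int)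
        else full * (lines.length : Int) + (R : Int))
        = ((min (pvK lines i0n target) 100000 : Nat) : Int) := by
      rw [← hKcast]
      split_ifs with h
      · omega
      · omega
    rw [hk']
    -- the final comprehension
    rw [PySem.List.pyRange_zero_natCast, List.map_map]
    symm
    apply congrArg
    apply List.map_congr_left
    intro j _
    simp only [Function.comp_apply, pyGetD_mod lines i0n hm j]

-- ===== VERDICT (by name: the statement is the Claim_ definition above) =====
theorem pack_contiguous_py_spec : Claim_equal_pack_contiguous_py := by
  intro lines start target _ hpre
  exact pack_contiguous_eq lines start target hpre
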